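-- pv_equiv track=rewrite | github.com/erumtw/oods-in-practice | 6_Recursion/ch6_item4.py | perket
-- ===== SOURCE A (Python) =====
-- def perket(N, i=None, result=None):
--     i = 0 if i == None else i
--     result = [] if result == None else result
--
--     if i < len(N):
--         if N[i] != []:
--             result.append(abs(sourness(N[i]) - bitterness(N[i])))
--             return perket(N, i+1, result)
--
--     return min(result)
--
-- def sourness(s, n=None):
--     n = 0 if n == None else n
--     if n < len(s) - 1:
--         return int(s[n].split()[0])  * int(sourness(s, n+1))
--     else:
--         return int(s[n].split()[0])
--
-- def bitterness(s, n=None):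
--     n = 0 if n == None else n
--     if n < len(s) - 1:
--         return int(s[n].split()[1]) + int(bitterness(s, n+1))
--     else:
--         return int(s[n].split()[1])
-- ===== SOURCE B (Python) =====
-- def perket(N, i=None, result=None):
--     i = 0 if i is None else i
--     result = [] if result is None else result
--     while i < len(N):
--         row = N[i]
--         if row == []:
--             break
--         p, s = 1, 0
--         for r in row:
--             toks = r.split()
--             p *= int(toks[0])
--             s += int(toks[1])
--         result.append(abs(p - s))
--         i += 1
--     return min(result)
-- ===== Notes on version B (the rewrite author's own statement) =====
-- stated objective: simpler
-- what changed: The three recursive functions (row recursion plus per-row recursive product and sum passes) are replaced by one iterative while-loop that makes a single pass over each row, accumulating the product and sum together.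
import Mathlib
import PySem

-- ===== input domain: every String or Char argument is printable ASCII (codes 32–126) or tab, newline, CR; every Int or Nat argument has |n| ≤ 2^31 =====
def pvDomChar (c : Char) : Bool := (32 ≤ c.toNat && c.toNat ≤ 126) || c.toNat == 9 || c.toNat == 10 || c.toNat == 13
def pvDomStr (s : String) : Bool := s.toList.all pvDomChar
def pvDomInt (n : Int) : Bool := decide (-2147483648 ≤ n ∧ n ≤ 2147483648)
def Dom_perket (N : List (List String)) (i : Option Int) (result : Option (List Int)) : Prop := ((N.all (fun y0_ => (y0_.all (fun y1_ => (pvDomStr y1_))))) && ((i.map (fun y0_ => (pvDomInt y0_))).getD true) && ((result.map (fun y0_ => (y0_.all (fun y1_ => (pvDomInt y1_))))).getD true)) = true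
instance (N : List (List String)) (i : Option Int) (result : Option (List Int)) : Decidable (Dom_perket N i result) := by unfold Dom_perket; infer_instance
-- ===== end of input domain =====

-- B has the same side effect as A (both append the per-row scores to the caller's `result` list);
-- the equivalence proved here is about the return value. Objective: simpler — one iterative loop
-- with a single pass per row instead of three recursive functions.

-- ===== PORT A =====
-- int(s[n].split()[k]) made total: out-of-range index / unparsable token give 0; Pre_ excludes those inputs.
def tokInt (r : String) (k : Int) : Int :=
  (PySem.Int.ofStr? ((PySem.List.pyGet? (PySem.Str.split₀ r) k).getD "")).getD 0

def sournessA (s : List String) (n : Nat) : Int :=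
  if n < s.length - 1 then
    tokInt (s.getD n "") 0 * sournessA s (n + 1)
  else
    tokInt (s.getD n "") 0
termination_by s.length - n

def bitternessA (s : List String) (n : Nat) : Int :=
  if n < s.length - 1 then
    tokInt (s.getD n "") 1 + bitternessA s (n + 1)
  else
    tokInt (s.getD n "") 1
termination_by s.length - n

-- min(result): ValueError on [] is excluded by Pre_, so the total port defaults to 0 there.
def perket (N : List (List String)) (i : Option Int) (result : Option (List Int)) : Int :=
  let i0 := i.getD 0
  let res := result.getD []
  if i0 < (N.length : Int) then
    let row := (PySem.List.pyGet? N i0).getD []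
    if row ≠ [] then
      perket N (some (i0 + 1)) (some (res ++ [|sournessA row 0 - bitternessA row 0|]))
    else
      (PySem.List.min? res (fun x => x)).getD 0
  else
    (PySem.List.min? res (fun x => x)).getD 0
termination_by ((N.length : Int) - (i.getD 0)).toNat
decreasing_by simp only [Option.getD_some]; omega

-- ===== PORT B =====
-- the while-loop of Source B; per row one left fold carrying the (product, sum) pair.
def perketAltLoop (N : List (List String)) (i : Int) (res : List Int) : Int :=
  if i < (N.length : Int) then
    let row := (PySem.List.pyGet? N i).getD []
    if row = [] then
      (PySem.List.min? res (fun x => x)).getD 0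
    else
      let ps := row.foldl (fun (ps : Int × Int) r => (ps.1 * tokInt r 0, ps.2 + tokInt r 1)) (1, 0)
      perketAltLoop N (i + 1) (res ++ [|ps.1 - ps.2|])
  else
    (PySem.List.min? res (fun x => x)).getD 0
termination_by ((N.length : Int) - i).toNat
decreasing_by omega

def perket_alt (N : List (List String)) (i : Option Int) (result : Option (List Int)) : Int :=
  perketAltLoop N (i.getD 0) (result.getD [])

-- ===== PRECONDITION & SPEC =====
-- row accessed as N[j] with Python indexing (Pre_ keeps indices in range, so the default is never used)
def rowAt (N : List (List String)) (j : Int) : List String :=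
  (PySem.List.pyGet? N j).getD []

-- every string of a processed row has ≥ 2 whitespace tokens whose first two parse as Python ints
def rowOK (row : List String) : Bool :=
  row.all (fun r =>
    2 ≤ (PySem.Str.split₀ r).length &&
    (PySem.Int.ofStr? ((PySem.Str.split₀ r).getD 0 "")).isSome &&
    (PySem.Int.ofStr? ((PySem.Str.split₀ r).getD 1 "")).isSome)

-- Pre_ = exactly the inputs where Python A returns: the first accessed index is in range
-- (no IndexError), every row visited before the loop stops parses (no ValueError/IndexError
-- from sourness/bitterness), and min is taken of a nonempty list (no ValueError).
def Pre_perket (N : List (List String)) (i : Option Int) (result : Option (List Int)) : Prop :=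
  let i0 := i.getD 0
  let L : Int := N.length
  (i0 < L → -L ≤ i0) ∧
  (∀ j ∈ PySem.List.pyRange i0 L 1,
     (∀ k ∈ PySem.List.pyRange i0 (j + 1) 1, rowAt N k ≠ []) → rowOK (rowAt N j) = true) ∧
  (result.getD [] ≠ [] ∨ (i0 < L ∧ rowAt N i0 ≠ []))

instance (N : List (List String)) (i : Option Int) (result : Option (List Int)) : Decidable (Pre_perket N i result) := by unfold Pre_perket; infer_instance

def pvWitness_perket : List (List String) × Option Int × Option (List Int) :=
  ([["3 7", "2 5"], ["1 1"]], none, none)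

def Spec_perket (N : List (List String)) (i : Option Int) (result : Option (List Int)) (out : Int) : Prop := out = perket_alt N i result
instance (N : List (List String)) (i : Option Int) (result : Option (List Int)) (out : Int) : Decidable (Spec_perket N i result out) := by unfold Spec_perket; infer_instance

-- ===== CLAIM (what is proved, stated in full; the proofs are below) =====
def Claim_equal_perket : Prop := ∀ (N : List (List String)) (i : Option Int) (result : Option (List Int)), Dom_perket N i result → Pre_perket N i result → Spec_perket N i result (perket N i result)

-- ===== LEMMAS AND PROOFS =====

-- A's right-to-left recursive product over a row equals the product over the dropped suffix
theorem sournessA_eq (s : List String) (n : Nat) (h : n < s.length) :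
    sournessA s n = ((s.drop n).map (fun r => tokInt r 0)).prod := by
  rw [sournessA]
  by_cases hc : n < s.length - 1
  · rw [if_pos hc, sournessA_eq s (n + 1) (by omega)]
    rw [List.drop_eq_getElem_cons h, List.getD_eq_getElem s "" h, List.map_cons, List.prod_cons]
  · rw [if_neg hc]
    have hdrop : s.drop n = [s[n]] := by
      rw [List.drop_eq_getElem_cons h, List.drop_eq_nil_of_le (by omega)]
    rw [List.getD_eq_getElem s "" h, hdrop, List.map_singleton, List.prod_singleton]
termination_by s.length - n

theorem bitternessA_eq (s : List String) (n : Nat) (h : n < s.length) :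
    bitternessA s n = ((s.drop n).map (fun r => tokInt r 1)).sum := by
  rw [bitternessA]
  by_cases hc : n < s.length - 1
  · rw [if_pos hc, bitternessA_eq s (n + 1) (by omega)]
    rw [List.drop_eq_getElem_cons h, List.getD_eq_getElem s "" h, List.map_cons, List.sum_cons]
  · rw [if_neg hc]
    have hdrop : s.drop n = [s[n]] := by
      rw [List.drop_eq_getElem_cons h, List.drop_eq_nil_of_le (by omega)]
    rw [List.getD_eq_getElem s "" h, hdrop, List.map_singleton, List.sum_singleton]
termination_by s.length - n

-- B's single fold carries exactly (product, sum)
theorem fold_prod_sum (row : List String) (a b : Int) :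
    row.foldl (fun (ps : Int × Int) r => (ps.1 * tokInt r 0, ps.2 + tokInt r 1)) (a, b) =
      (a * (row.map (fun r => tokInt r 0)).prod, b + (row.map (fun r => tokInt r 1)).sum) := by
  induction row generalizing a b with
  | nil => simp
  | cons r t ih =>
    simp only [List.foldl_cons, List.map_cons, List.prod_cons, List.sum_cons, ih]
    rw [Prod.mk.injEq]
    constructor <;> ring

theorem perket_eq_loop (N : List (List String)) :
    ∀ k (i : Int) (res : List Int), ((N.length : Int) - i).toNat = k →
      perket N (some i) (some res) = perketAltLoop N i res := by
  intro k
  induction k using Nat.strong_induction_on with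
  | _ k ih =>
    intro i res hk
    rw [perket, perketAltLoop]
    simp only [Option.getD_some]
    by_cases hi : i < (N.length : Int)
    · rw [if_pos hi, if_pos hi]
      set row := (PySem.List.pyGet? N i).getD [] with hrow
      by_cases he : row = []
      · rw [if_neg (by simp [he]), if_pos he]
      · rw [if_pos (by simp [he]), if_neg he]
        have hlen : 0 < row.length := List.length_pos_of_ne_nil he
        rw [fold_prod_sum, sournessA_eq row 0 hlen, bitternessA_eq row 0 hlen]
        simp only [List.drop_zero, one_mul, zero_add]
        exact ih (((N.length : Int) - (i + 1)).toNat) (by omega) (i + 1) _ rfl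
    · rw [if_neg hi, if_neg hi]

-- ===== VERDICT (by name: the statement is the Claim_ definition above) =====
theorem perket_spec : Claim_equal_perket := by
  intro N i result _ _
  unfold Spec_perket perket_alt
  have h : perket N i result = perket N (some (i.getD 0)) (some (result.getD [])) := by
    conv_lhs => rw [perket]
    conv_rhs => rw [perket]
    simp only [Option.getD_some]
  rw [h]
  exact perket_eq_loop N _ _ _ rfl
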